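-- pv_equiv track=rewrite | github.com/Borgerod/leetcode_submissions | problems/incomplete/420_strong_password_checker/strong_password_checker copy.py | remove_from_repetitions
-- ===== SOURCE A (Python) =====
-- def remove_from_repetitions(password: str, removes_needed: int) -> str:
--     password_list = list(password)
--     i = 0
--     removed = 0
--
--     while removed < removes_needed and i < len(password_list):
--         j = i
--         while j < len(password_list) and password_list[j] == password_list[i]:
--             j += 1
--
--         rep_len = j - i
--         if rep_len >= 3:
--             chars_to_remove = min(rep_len % 3 if rep_len % 3 != 0 else 1, removes_needed - removed)
--             for _ in range(chars_to_remove):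
--                 password_list.pop(i)
--                 removed += 1
--             i += max(0, rep_len - chars_to_remove - 2)
--         else:
--             i = j
--
--     while removed < removes_needed:
--         password_list.pop(0)
--         removed += 1
--
--     return ''.join(password_list)
-- ===== SOURCE B (Python) =====
-- def remove_from_repetitions(password: str, removes_needed: int) -> str:
--     # One forward pass over maximal runs; builds the result with string pieces
--     # instead of O(n) list.pop calls, then trims any leftover budget from the front.
--     budget = removes_needed
--     parts = []
--     n = len(password)
--     i = 0
--     while i < n:
--         j = i
--         while j < n and password[j] == password[i]:
--             j += 1
--         run_len = j - i
--         cut = 0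
--         if run_len >= 3 and budget > 0:
--             cut = min(run_len % 3 or 1, budget)
--             budget -= cut
--         parts.append(password[i] * (run_len - cut))
--         i = j
--     s = ''.join(parts)
--     if budget > 0:
--         s = s[budget:]
--     return s
-- ===== Notes on version B (the rewrite author's own statement) =====
-- stated objective: faster
-- what changed: Single forward pass over maximal runs that assembles the result from string pieces (and trims leftover budget with one slice), instead of A's in-place list with repeated O(n) list.pop(i)/pop(0) calls and re-scanning leftover run tails.
import Mathlib
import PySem

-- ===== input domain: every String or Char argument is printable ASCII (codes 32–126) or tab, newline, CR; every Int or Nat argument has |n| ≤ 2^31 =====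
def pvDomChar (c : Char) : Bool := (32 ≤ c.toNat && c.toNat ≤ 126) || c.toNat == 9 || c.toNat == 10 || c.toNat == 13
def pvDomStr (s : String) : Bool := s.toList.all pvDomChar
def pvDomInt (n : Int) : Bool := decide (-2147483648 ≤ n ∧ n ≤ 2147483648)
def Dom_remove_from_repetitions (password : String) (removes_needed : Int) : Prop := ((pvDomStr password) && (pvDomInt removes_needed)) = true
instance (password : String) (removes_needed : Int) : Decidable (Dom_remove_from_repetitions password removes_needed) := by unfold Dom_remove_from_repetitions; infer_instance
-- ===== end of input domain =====

-- B replaces A's in-place list editing (repeated O(n) list.pop(i)/pop(0) calls and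
-- re-scans of leftover run tails) by one forward pass over maximal runs that builds
-- the result from pieces and trims the leftover budget with a single slice.

-- ===== PORT A =====
-- Shared helper: both A's and B's Python contain the identical inner run-scanning
-- while loop 'j = i; while j < len and s[j] == s[i]: j += 1'.
def runEndAux (l : List Char) (c : Char) (j : Nat) : Nat :=
  if h : j < l.length then
    if l[j] = c then runEndAux l c (j + 1) else j
  else j
termination_by l.length - j

def runEnd (l : List Char) (i : Nat) : Nat :=
  if h : i < l.length then runEndAux l l[i] i else i

-- 'for _ in range(n): lst.pop(i)' (the index is always in range in A; Python's
-- list.pop(i) is List.eraseIdx there)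
def aPopN (l : List Char) (i : Nat) : Nat → List Char
  | 0 => l
  | n + 1 => aPopN (l.eraseIdx i) i n

-- needed by aLoop's decreasing_by
theorem runEndAux_ge (l : List Char) (c : Char) (j : Nat) : j ≤ runEndAux l c j := by
  fun_induction runEndAux with
  | case1 j h heq ih => omega
  | case2 j h heq => omega
  | case3 j h => omega

theorem runEnd_gt (l : List Char) (i : Nat) (h : i < l.length) : i < runEnd l i := by
  unfold runEnd
  rw [dif_pos h]
  unfold runEndAux
  rw [dif_pos h, if_pos rfl]
  have := runEndAux_ge l l[i] (i + 1)
  omega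

-- A's outer while loop; state = (password_list, i, removed); Python's always-
-- nonnegative indices i, j are carried as Nat, the counters as Int
def aLoop (l : List Char) (i : Nat) (removed need : Int) : List Char × Int :=
  if h : removed < need ∧ i < l.length then
    if 3 ≤ (runEnd l i : Int) - (i : Int) then
      aLoop
        (aPopN l i (min (if ((runEnd l i : Int) - (i : Int)) % 3 ≠ 0 then ((runEnd l i : Int) - (i : Int)) % 3 else 1) (need - removed)).toNat)
        (i + (max 0 ((runEnd l i : Int) - (i : Int) - min (if ((runEnd l i : Int) - (i : Int)) % 3 ≠ 0 then ((runEnd l i : Int) - (i : Int)) % 3 else 1) (need - removed) - 2)).toNat)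
        (removed + min (if ((runEnd l i : Int) - (i : Int)) % 3 ≠ 0 then ((runEnd l i : Int) - (i : Int)) % 3 else 1) (need - removed))
        need
    else aLoop l (runEnd l i) removed need
  else (l, removed)
termination_by ((need - removed).toNat, l.length - i)
decreasing_by
  · apply Prod.Lex.left
    rcases eq_or_ne (((runEnd l i : Int) - (i : Int)) % 3) 0 with hz | hz <;>
      simp [hz] <;> omega
  · have := runEnd_gt l i h.2
    apply Prod.Lex.right
    omega

-- A's final 'while removed < removes_needed: password_list.pop(0)'; Python raises
-- IndexError on the empty list (excluded by Pre_); the port returns [] there.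
def aTail (l : List Char) (removed need : Int) : List Char :=
  if removed < need then
    match l with
    | [] => []
    | _ :: t => aTail t (removed + 1) need
  else l
termination_by (need - removed).toNat
decreasing_by omega

def remove_from_repetitions (password : String) (removes_needed : Int) : String :=
  String.ofList
    (aTail (aLoop password.toList 0 0 removes_needed).1
      (aLoop password.toList 0 0 removes_needed).2 removes_needed)

-- ===== PORT B =====
-- Source B's 'cut = 0; if run_len >= 3 and budget > 0: cut = min(run_len % 3 or 1, budget)'
def bCut (L budget : Int) : Int :=
  if 3 ≤ L ∧ 0 < budget then min (if L % 3 ≠ 0 then L % 3 else 1) budget else 0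

-- B's single forward pass: per maximal run append the kept piece and update budget
def bParts (l : List Char) (i : Nat) (budget : Int) : List (List Char) × Int :=
  if h : i < l.length then
    (List.replicate ((runEnd l i : Int) - (i : Int) - bCut ((runEnd l i : Int) - (i : Int)) budget).toNat l[i]
        :: (bParts l (runEnd l i) (budget - bCut ((runEnd l i : Int) - (i : Int)) budget)).1,
     (bParts l (runEnd l i) (budget - bCut ((runEnd l i : Int) - (i : Int)) budget)).2)
  else ([], budget)
termination_by l.length - i
decreasing_by
  have := runEnd_gt l i h
  omega

def remove_from_repetitions_alt (password : String) (removes_needed : Int) : String :=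
  String.ofList
    (if 0 < (bParts password.toList 0 removes_needed).2 then
      -- 's = s[budget:]' with budget > 0
      PySem.List.slice (bParts password.toList 0 removes_needed).1.flatten
        (some (bParts password.toList 0 removes_needed).2) none
    else (bParts password.toList 0 removes_needed).1.flatten)

-- ===== PRECONDITION & SPEC =====
-- Pre_ excludes exactly the inputs where A raises IndexError: when removes_needed
-- exceeds len(password), A's final pop(0) loop empties the list and pops again.
def Pre_remove_from_repetitions (password : String) (removes_needed : Int) : Prop :=
  removes_needed ≤ (password.length : Int)
instance (password : String) (removes_needed : Int) : Decidable (Pre_remove_from_repetitions password removes_needed) := by unfold Pre_remove_from_repetitions; infer_instance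

def pvWitness_remove_from_repetitions : String × Int := ("aaaabcc", 3)

def Spec_remove_from_repetitions (password : String) (removes_needed : Int) (out : String) : Prop := out = remove_from_repetitions_alt password removes_needed
instance (password : String) (removes_needed : Int) (out : String) : Decidable (Spec_remove_from_repetitions password removes_needed out) := by unfold Spec_remove_from_repetitions; infer_instance

-- ===== CLAIM (what is proved, stated in full; the proofs are below) =====
def Claim_equal_remove_from_repetitions : Prop := ∀ (password : String) (removes_needed : Int), Dom_remove_from_repetitions password removes_needed → Pre_remove_from_repetitions password removes_needed → Spec_remove_from_repetitions password removes_needed (remove_from_repetitions password removes_needed)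

-- ===== LEMMAS AND PROOFS =====

theorem bCut_zero (L b : Int) (h : ¬ (3 ≤ L ∧ 0 < b)) : bCut L b = 0 := by
  unfold bCut; rw [if_neg h]

theorem bCut_pos_spec (L b : Int) (h3 : 3 ≤ L) (hb : 0 < b) :
    1 ≤ bCut L b ∧ bCut L b ≤ b ∧ bCut L b ≤ L - 2 := by
  unfold bCut; rw [if_pos ⟨h3, hb⟩]; split_ifs <;> omega

theorem bCut_cases (L b : Int) :
    bCut L b = 0 ∨ (3 ≤ L ∧ 0 < b ∧ 1 ≤ bCut L b ∧ bCut L b ≤ b ∧ bCut L b ≤ L - 2) := by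
  by_cases h : 3 ≤ L ∧ 0 < b
  · exact Or.inr ⟨h.1, h.2, bCut_pos_spec L b h.1 h.2⟩
  · exact Or.inl (bCut_zero L b h)

-- proof-side suffix form of B's run pass: (flattened kept chars, leftover budget)
def fB : List Char → Int → List Char × Int
  | [], b => ([], b)
  | ch :: t, b =>
    (List.replicate ((1 + ((t.takeWhile (· = ch)).length : Int))
          - bCut (1 + ((t.takeWhile (· = ch)).length : Int)) b).toNat ch
        ++ (fB (t.dropWhile (· = ch)) (b - bCut (1 + ((t.takeWhile (· = ch)).length : Int)) b)).1,
     (fB (t.dropWhile (· = ch)) (b - bCut (1 + ((t.takeWhile (· = ch)).length : Int)) b)).2)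
termination_by l => l.length
decreasing_by
  have := List.length_dropWhile_le (fun x => decide (x = ch)) t
  simp at this ⊢; omega

theorem dropWhile_eq_drop {α : Type} (p : α → Bool) (t : List α) :
    t.dropWhile p = t.drop (t.takeWhile p).length := by
  induction t with
  | nil => simp
  | cons a t ih => by_cases h : p a <;> simp [List.dropWhile, h, ih]

theorem takeWhile_eq_replicate (ch : Char) (t : List Char) :
    t.takeWhile (· = ch) = List.replicate (t.takeWhile (· = ch)).length ch := by
  induction t with
  | nil => simp
  | cons a t ih =>
    by_cases h : a = ch
    · simp [List.takeWhile, h, List.replicate]; exact ih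
    · simp [List.takeWhile, h]

theorem takeWhile_dropWhile_nil {α : Type} (p : α → Bool) (t : List α) :
    (t.dropWhile p).takeWhile p = [] := by
  induction t with
  | nil => simp
  | cons a t ih =>
    by_cases h : p a
    · simpa [List.dropWhile, h] using ih
    · simp [List.dropWhile, h]

theorem dropWhile_dropWhile {α : Type} (p : α → Bool) (t : List α) :
    (t.dropWhile p).dropWhile p = t.dropWhile p := by
  conv_lhs => rw [dropWhile_eq_drop, takeWhile_dropWhile_nil]
  simp

theorem fB_nil (b : Int) : fB [] b = ([], b) := by rw [fB]

theorem fB_cons (ch : Char) (t : List Char) (b : Int) :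
    fB (ch :: t) b =
      (List.replicate ((1 + ((t.takeWhile (· = ch)).length : Int))
            - bCut (1 + ((t.takeWhile (· = ch)).length : Int)) b).toNat ch
          ++ (fB (t.dropWhile (· = ch)) (b - bCut (1 + ((t.takeWhile (· = ch)).length : Int)) b)).1,
       (fB (t.dropWhile (· = ch)) (b - bCut (1 + ((t.takeWhile (· = ch)).length : Int)) b)).2) := by
  rw [fB]

-- the full run put back together
theorem replicate_run (ch : Char) (t : List Char) :
    List.replicate ((1 : Int) + ((t.takeWhile (· = ch)).length : Int)).toNat ch
      ++ t.dropWhile (· = ch) = ch :: t := by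
  have hn : ((1 : Int) + ((t.takeWhile (· = ch)).length : Int)).toNat
      = (t.takeWhile (· = ch)).length + 1 := by omega
  rw [hn, List.replicate_succ, List.cons_append, ← takeWhile_eq_replicate,
    List.takeWhile_append_dropWhile]

theorem fB_nonpos (s : List Char) (b : Int) : b ≤ 0 → fB s b = (s, b) := by
  induction s, b using fB.induct with
  | case1 b => intro _; rw [fB_nil]
  | case2 ch t b ih =>
    intro hb
    have hc : bCut (1 + ((t.takeWhile (· = ch)).length : Int)) b = 0 :=
      bCut_zero _ _ (by omega)
    rw [hc] at ih
    simp only [sub_zero] at ih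
    rw [fB_cons, hc]
    simp only [sub_zero, ih hb, replicate_run]

theorem fB_spec (s : List Char) (b : Int) :
    (fB s b).2 ≤ b ∧ b - (fB s b).2 ≤ (s.length : Int) ∧
      ((fB s b).1.length : Int) = (s.length : Int) - (b - (fB s b).2) := by
  induction s, b using fB.induct with
  | case1 b => rw [fB_nil]; simp
  | case2 ch t b ih =>
    rw [fB_cons]
    obtain ⟨ih1, ih2, ih3⟩ := ih
    have hu : (t.dropWhile (· = ch)).length = t.length - (t.takeWhile (· = ch)).length := by
      rw [dropWhile_eq_drop, List.length_drop]
    have hkt : (t.takeWhile (· = ch)).length ≤ t.length := (List.takeWhile_sublist _).length_le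
    rcases bCut_cases (1 + ((t.takeWhile (· = ch)).length : Int)) b with h0 | ⟨h3, hb, h1, hcb, hle⟩ <;>
      refine ⟨?_, ?_, ?_⟩ <;> simp only [List.length_append, List.length_replicate, List.length_cons] <;>
        push_cast <;> omega

-- bridge from the indexed run scan to the suffix form
theorem runEndAux_eq (l : List Char) (c : Char) (j : Nat) :
    runEndAux l c j = j + ((l.drop j).takeWhile (· = c)).length := by
  fun_induction runEndAux with
  | case1 j h heq ih =>
    rw [List.drop_eq_getElem_cons h]
    simp [List.takeWhile, heq]
    omega
  | case2 j h heq =>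
    rw [List.drop_eq_getElem_cons h]
    simp [List.takeWhile, heq]
  | case3 j h =>
    rw [List.drop_eq_nil_of_le (by omega)]
    simp

theorem aPopN_append (n : Nat) (p s : List Char) :
    aPopN (p ++ s) p.length n = p ++ s.drop n := by
  induction n generalizing s with
  | zero => simp [aPopN]
  | succ n ih =>
    unfold aPopN
    rw [List.eraseIdx_append_of_length_le (Nat.le_refl _)]
    simp only [Nat.sub_self]
    cases s with
    | nil => simpa [List.eraseIdx] using ih []
    | cons a s => simpa [List.eraseIdx] using ih s

theorem runEnd_drop (l : List Char) (i : Nat) (h : i < l.length) :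
    runEnd l i = i + 1 + ((l.drop (i + 1)).takeWhile (· = l[i])).length := by
  unfold runEnd
  rw [dif_pos h, runEndAux_eq, List.drop_eq_getElem_cons h, List.takeWhile_cons,
    if_pos (by simp), List.length_cons]
  omega

theorem bParts_eq_fB (l : List Char) (i : Nat) (b : Int) :
    ((bParts l i b).1.flatten, (bParts l i b).2) = fB (l.drop i) b := by
  induction i, b using bParts.induct l with
  | case1 i b h ih =>
    rw [bParts.eq_def, dif_pos h]
    rw [List.drop_eq_getElem_cons h, fB_cons]
    have hre := runEnd_drop l i h
    have hL : ((runEnd l i : Int) - (i : Int))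
        = 1 + (((l.drop (i + 1)).takeWhile (· = l[i])).length : Int) := by
      rw [hre]; push_cast; ring
    have hdrop : l.drop (runEnd l i) = (l.drop (i + 1)).dropWhile (· = l[i]) := by
      rw [dropWhile_eq_drop, List.drop_drop, hre]
    rw [hL] at ih ⊢
    rw [hdrop] at ih
    simp only [List.flatten_cons]
    rw [Prod.ext_iff] at ih ⊢
    dsimp only at ih ⊢
    exact ⟨by rw [ih.1], ih.2⟩
  | case2 i b h =>
    rw [bParts.eq_def, dif_neg h, List.drop_eq_nil_of_le (by omega), fB_nil]
    simp

-- fB after the two leftover copies of a fully processed run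
theorem fB_left2 (ch : Char) (t : List Char) (b : Int) :
    fB (ch :: ch :: t.dropWhile (· = ch)) b
      = (ch :: ch :: (fB (t.dropWhile (· = ch)) b).1, (fB (t.dropWhile (· = ch)) b).2) := by
  rw [fB_cons]
  have h1 : (ch :: t.dropWhile (· = ch)).takeWhile (· = ch) = [ch] := by
    simp [takeWhile_dropWhile_nil]
  have h2 : (ch :: t.dropWhile (· = ch)).dropWhile (· = ch) = t.dropWhile (· = ch) := by
    simp [dropWhile_dropWhile]
  rw [h1, h2]
  have h0 : bCut (1 + ((([ch] : List Char)).length : Int)) b = 0 := by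
    apply bCut_zero; simp
  rw [h0]
  have h4 : ((1 + ((([ch] : List Char)).length : Int)) - 0).toNat = 2 := by simp
  rw [h4, sub_zero]
  rfl

-- main lemma: A's loop, started at the boundary |p|, keeps p and acts as fB on s
theorem aLoop_eq (need removed : Int) (p s : List Char) :
    aLoop (p ++ s) p.length removed need
      = (p ++ (fB s (need - removed)).1, need - (fB s (need - removed)).2) := by
  by_cases hrm : removed < need
  · cases s with
    | nil =>
      rw [aLoop.eq_def]
      have hnc : ¬ (removed < need ∧ p.length < (p ++ ([] : List Char)).length) := by simp
      rw [dif_neg hnc, fB_nil]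
      simp
    | cons ch t =>
      have hcond : removed < need ∧ p.length < (p ++ ch :: t).length := ⟨hrm, by simp⟩
      have hre : runEnd (p ++ ch :: t) p.length
          = p.length + 1 + (t.takeWhile (· = ch)).length := by
        have hl : p.length < (p ++ ch :: t).length := by simp
        have hget : (p ++ ch :: t)[p.length]'hl = ch := by
          rw [List.getElem_append_right (Nat.le_refl _)]
          simp
        have hdrop : (p ++ ch :: t).drop (p.length + 1) = t := by
          rw [← List.drop_drop, List.drop_left]
          simp
        rw [runEnd_drop _ _ hl, hget, hdrop]
      have hL : ((runEnd (p ++ ch :: t) p.length : Int) - (p.length : Int))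
          = 1 + ((t.takeWhile (· = ch)).length : Int) := by rw [hre]; push_cast; ring
      rw [aLoop.eq_def, dif_pos hcond, hL, hre]
      by_cases h3 : 3 ≤ 1 + ((t.takeWhile (· = ch)).length : Int)
      · rw [if_pos h3]
        have hb : 0 < need - removed := by omega
        have hmin : min (if (1 + ((t.takeWhile (· = ch)).length : Int)) % 3 ≠ 0 then
              (1 + ((t.takeWhile (· = ch)).length : Int)) % 3 else 1) (need - removed)
            = bCut (1 + ((t.takeWhile (· = ch)).length : Int)) (need - removed) := by
          have hand : (3 : Int) ≤ 1 + ((t.takeWhile (· = ch)).length : Int) ∧ 0 < need - removed :=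
            ⟨h3, hb⟩
          unfold bCut
          rw [if_pos hand]
        rw [hmin]
        obtain ⟨hc1, hcb, hcle⟩ := bCut_pos_spec _ _ h3 hb
        -- abbreviations for readability of the proof script below
        generalize hcdef : bCut (1 + ((t.takeWhile (· = ch)).length : Int)) (need - removed) = c at *
        have hk2 : 2 ≤ (t.takeWhile (· = ch)).length := by omega
        have hcn : ((c.toNat : Int)) = c := Int.toNat_of_nonneg (by omega)
        -- the popped list
        have hpop : aPopN (p ++ ch :: t) p.length c.toNat
            = p ++ (List.replicate ((t.takeWhile (· = ch)).length + 1 - c.toNat) ch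
                ++ t.dropWhile (· = ch)) := by
          rw [aPopN_append]
          congr 1
          have hs : ch :: t = List.replicate ((t.takeWhile (· = ch)).length + 1) ch
              ++ t.dropWhile (· = ch) := by
            rw [List.replicate_succ, List.cons_append, ← takeWhile_eq_replicate,
              List.takeWhile_append_dropWhile]
          rw [hs, List.drop_append_of_le_length (by simp; omega), List.drop_replicate]
        have hd : (max 0 (1 + ((t.takeWhile (· = ch)).length : Int) - c - 2)).toNat
            = (t.takeWhile (· = ch)).length - 1 - c.toNat := by omega
        have hsplit2 : List.replicate ((t.takeWhile (· = ch)).length + 1 - c.toNat) ch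
              ++ t.dropWhile (· = ch)
            = List.replicate ((t.takeWhile (· = ch)).length - 1 - c.toNat) ch
              ++ (ch :: ch :: t.dropWhile (· = ch)) := by
          rw [show (t.takeWhile (· = ch)).length + 1 - c.toNat
              = ((t.takeWhile (· = ch)).length - 1 - c.toNat) + 2 by omega,
            List.replicate_add, List.append_assoc]
          rfl
        rw [hpop, hd, hsplit2, ← List.append_assoc]
        have hlen : (p ++ List.replicate ((t.takeWhile (· = ch)).length - 1 - c.toNat) ch).length
            = p.length + ((t.takeWhile (· = ch)).length - 1 - c.toNat) := by simp
        rw [← hlen]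
        rw [aLoop_eq need (removed + c)
          (p ++ List.replicate ((t.takeWhile (· = ch)).length - 1 - c.toNat) ch)
          (ch :: ch :: t.dropWhile (· = ch))]
        have hsub : need - (removed + c) = (need - removed) - c := by ring
        rw [hsub, fB_left2, fB_cons, hcdef]
        simp only [Prod.mk.injEq]
        refine ⟨?_, trivial⟩
        rw [List.append_assoc]
        congr 1
        rw [show ((1 : Int) + ((t.takeWhile (· = ch)).length : Int) - c).toNat
            = ((t.takeWhile (· = ch)).length - 1 - c.toNat) + 2 by omega,
          List.replicate_add, List.append_assoc]
        rfl
      · rw [if_neg h3]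
        have hsplit : p ++ ch :: t
            = (p ++ ch :: t.takeWhile (· = ch)) ++ t.dropWhile (· = ch) := by
          rw [List.append_assoc, List.cons_append, List.takeWhile_append_dropWhile]
        have hlen2 : (p ++ ch :: t.takeWhile (· = ch)).length
            = p.length + 1 + (t.takeWhile (· = ch)).length := by
          rw [List.length_append, List.length_cons]
          omega
        rw [hsplit, ← hlen2,
          aLoop_eq need removed (p ++ ch :: t.takeWhile (· = ch)) (t.dropWhile (· = ch)),
          fB_cons, bCut_zero _ _ (by intro hx; exact h3 hx.1)]
        simp only [sub_zero, Prod.mk.injEq]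
        refine ⟨?_, trivial⟩
        rw [List.append_assoc]
        congr 2
        rw [show ((1 : Int) + ((t.takeWhile (· = ch)).length : Int)).toNat
            = (t.takeWhile (· = ch)).length + 1 by omega,
          List.replicate_succ, ← takeWhile_eq_replicate]
  · rw [aLoop.eq_def]
    have hnc : ¬ (removed < need ∧ p.length < (p ++ s).length) := by
      intro hcn; exact hrm hcn.1
    rw [dif_neg hnc, fB_nonpos s _ (by omega)]
    simp
termination_by ((need - removed).toNat, s.length)
decreasing_by
  · apply Prod.Lex.left
    omega
  · apply Prod.Lex.right
    have := List.length_dropWhile_le (fun x => decide (x = ch)) t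
    simp only [List.length_cons] at this ⊢
    omega

theorem aTail_drop (l : List Char) (removed need : Int) :
    (need - removed).toNat ≤ l.length →
    aTail l removed need = l.drop (need - removed).toNat := by
  induction l, removed using aTail.induct need with
  | case1 removed h =>
    intro _
    rw [aTail.eq_def, if_pos h]
    simp
  | case2 removed h x t ih =>
    intro hle
    simp only [List.length_cons] at hle
    rw [aTail.eq_def, if_pos h]
    rw [show (need - removed).toNat = (need - (removed + 1)).toNat + 1 by omega,
      List.drop_succ_cons]
    exact ih (by omega)
  | case3 l removed h =>
    intro _
    rw [aTail.eq_def, if_neg h, show (need - removed).toNat = 0 by omega, List.drop_zero]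

-- ===== VERDICT (by name: the statement is the Claim_ definition above) =====
theorem remove_from_repetitions_spec : Claim_equal_remove_from_repetitions := by
  unfold Claim_equal_remove_from_repetitions
  intro password n _ hpre
  unfold Pre_remove_from_repetitions at hpre
  unfold Spec_remove_from_repetitions
  unfold remove_from_repetitions remove_from_repetitions_alt
  have hlen : (password.toList.length : Int) = (password.length : Int) := by
    rw [String.length_toList]
  have hA := aLoop_eq n 0 [] password.toList
  simp only [List.nil_append, List.length_nil, sub_zero] at hA
  rw [hA]
  dsimp only
  have hB := bParts_eq_fB password.toList 0 n
  simp only [List.drop_zero] at hB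
  have hB1 : (bParts password.toList 0 n).1.flatten = (fB password.toList n).1 :=
    congrArg Prod.fst hB
  have hB2 : (bParts password.toList 0 n).2 = (fB password.toList n).2 :=
    congrArg Prod.snd hB
  obtain ⟨h1, h2, h3⟩ := fB_spec password.toList n
  rw [aTail_drop _ _ _ (by omega), hB1, hB2]
  by_cases hpos : 0 < (fB password.toList n).2
  · rw [if_pos hpos, PySem.List.slice_from _ (by omega)]
    congr 2
    omega
  · rw [if_neg hpos,
      show (n - (n - (fB password.toList n).2)).toNat = 0 by omega, List.drop_zero]
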